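-- pv_equiv track=rewrite | github.com/SeaCannon1122/MineC | client/pixelfont_generator.py | bitmap_to_uint32
-- ===== SOURCE A (Python) =====
-- def bitmap_to_uint32(bitmap, resolution):
--     flat_bits = []
--     for row in bitmap:
--         flat_bits.extend(row)
--     # Pad flat_bits to multiple of 32
--     if len(flat_bits) % 32 != 0:
--         flat_bits += [0] * (32 - len(flat_bits) % 32)
--     uint32_array = []
--     for i in range(0, len(flat_bits), 32):
--         val = 0
--         for bit in flat_bits[i:i+32]:
--             val = (val << 1) | bit
--         uint32_array.append(val)
--     return uint32_array
-- ===== SOURCE B (Python) =====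
-- def bitmap_to_uint32(bitmap, resolution):
--     # single streaming pass: pack bits into a running word, flush every 32 bits
--     uint32_array = []
--     val = 0
--     count = 0
--     for row in bitmap:
--         for bit in row:
--             val = (val << 1) | bit
--             count += 1
--             if count == 32:
--                 uint32_array.append(val)
--                 val = 0
--                 count = 0
--     if count > 0:
--         uint32_array.append(val << (32 - count))
--     return uint32_array
-- ===== Notes on version B (the rewrite author's own statement) =====
-- stated objective: simpler
-- what changed: Replaces A's three phases (flatten all rows into a list, pad it to a multiple of 32, then chunk-and-pack with slices) by one streaming pass over the rows that maintains a running word and bit counter, flushing every 32 bits and shift-padding the final partial word.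
import Mathlib
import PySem

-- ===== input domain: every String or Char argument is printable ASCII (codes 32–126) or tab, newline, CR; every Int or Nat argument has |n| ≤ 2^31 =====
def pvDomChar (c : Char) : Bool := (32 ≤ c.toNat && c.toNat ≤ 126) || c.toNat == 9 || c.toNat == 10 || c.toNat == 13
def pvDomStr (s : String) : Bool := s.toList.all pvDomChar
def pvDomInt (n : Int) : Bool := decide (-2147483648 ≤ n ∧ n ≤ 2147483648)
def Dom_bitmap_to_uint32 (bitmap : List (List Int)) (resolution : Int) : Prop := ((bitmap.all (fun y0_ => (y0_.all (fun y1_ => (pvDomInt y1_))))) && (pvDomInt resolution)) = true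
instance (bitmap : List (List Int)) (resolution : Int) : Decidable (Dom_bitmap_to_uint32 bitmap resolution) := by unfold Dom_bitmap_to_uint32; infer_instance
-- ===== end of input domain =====

-- B replaces A's flatten+pad+chunk three-phase packing by a single streaming pass (simpler decomposition, same O(n) cost).


-- ===== PORT A =====
def bitmap_to_uint32 (bitmap : List (List Int)) (resolution : Int) : List Int :=
  let flat_bits : List Int := bitmap.foldl (fun acc row => acc ++ row) []
  let flat_bits : List Int :=
    if flat_bits.length % 32 ≠ 0 then
      flat_bits ++ List.replicate (32 - flat_bits.length % 32) (0 : Int)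
    else flat_bits
  (PySem.List.pyRange 0 (flat_bits.length : Int) 32).foldl (fun uint32_array i =>
    uint32_array ++
      [(PySem.List.slice flat_bits (some i) (some (i + 32))).foldl
        (fun val bit => PySem.Int.bor (val <<< (1 : Nat)) bit) 0]) []

-- ===== PORT B =====
def bitmap_to_uint32_alt (bitmap : List (List Int)) (resolution : Int) : List Int :=
  let st : Int × Nat × List Int :=
    bitmap.foldl (fun s row =>
      row.foldl (fun (s : Int × Nat × List Int) bit =>
        let val := PySem.Int.bor (s.1 <<< (1 : Nat)) bit
        let count := s.2.1 + 1
        if count = 32 then (0, 0, s.2.2 ++ [val]) else (val, count, s.2.2)) s) (0, 0, [])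
  if st.2.1 > 0 then st.2.2 ++ [st.1 <<< (32 - st.2.1)] else st.2.2

-- ===== PRECONDITION & SPEC =====
def Spec_bitmap_to_uint32 (bitmap : List (List Int)) (resolution : Int) (out : List Int) : Prop := out = bitmap_to_uint32_alt bitmap resolution
instance (bitmap : List (List Int)) (resolution : Int) (out : List Int) : Decidable (Spec_bitmap_to_uint32 bitmap resolution out) := by unfold Spec_bitmap_to_uint32; infer_instance

-- ===== CLAIM (what is proved, stated in full; the proofs are below) =====
def Claim_equal_bitmap_to_uint32 : Prop := ∀ (bitmap : List (List Int)) (resolution : Int), Dom_bitmap_to_uint32 bitmap resolution → Spec_bitmap_to_uint32 bitmap resolution (bitmap_to_uint32 bitmap resolution)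

-- ===== LEMMAS AND PROOFS =====

-- proof-only helpers: named copies of the inline lambdas of the two ports
def pvPack (v : Int) (c : List Int) : Int :=
  c.foldl (fun val bit => PySem.Int.bor (val <<< (1 : Nat)) bit) v

def pvStep (s : Int × Nat × List Int) (bit : Int) : Int × Nat × List Int :=
  let val := PySem.Int.bor (s.1 <<< (1 : Nat)) bit
  let count := s.2.1 + 1
  if count = 32 then (0, 0, s.2.2 ++ [val]) else (val, count, s.2.2)

def pvFin (s : Int × Nat × List Int) : List Int :=
  if s.2.1 > 0 then s.2.2 ++ [s.1 <<< (32 - s.2.1)] else s.2.2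

def pvPad (l : List Int) : List Int :=
  if l.length % 32 ≠ 0 then l ++ List.replicate (32 - l.length % 32) (0 : Int) else l

def pvChunk (l : List Int) : List Int :=
  if h : l = [] then [] else pvPack 0 (l.take 32) :: pvChunk (l.drop 32)
termination_by l.length
decreasing_by
  cases l with
  | nil => exact absurd rfl h
  | cons a t => simp

theorem pvFoldlAppend (bm : List (List Int)) (acc : List Int) :
    bm.foldl (fun acc row => acc ++ row) acc = acc ++ bm.flatten := by
  induction bm generalizing acc with
  | nil => simp
  | cons r t ih => simp [List.foldl, ih]

theorem pvFoldlFlatten (bm : List (List Int)) (s : Int × Nat × List Int) :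
    bm.foldl (fun s row => row.foldl pvStep s) s = bm.flatten.foldl pvStep s := by
  induction bm generalizing s with
  | nil => simp
  | cons r t ih => simp [List.foldl, ih]

theorem pvRange32_nil (a b : Int) (h : b ≤ a) : PySem.List.pyRange a b 32 = [] := by
  rw [PySem.List.pyRange_of_pos _ _ (by norm_num : (0:Int) < 32), if_neg (by omega)]
  simp

theorem pvRange32_cons (a b : Int) (h : a < b) :
    PySem.List.pyRange a b 32 = a :: PySem.List.pyRange (a + 32) b 32 := by
  rw [PySem.List.pyRange_of_pos _ _ (by norm_num : (0:Int) < 32),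
      PySem.List.pyRange_of_pos _ _ (by norm_num : (0:Int) < 32), if_pos h]
  by_cases h2 : a + 32 < b
  · rw [if_pos h2]
    have hm : ((b - a + 32 - 1) / 32).toNat = ((b - (a + 32) + 32 - 1) / 32).toNat + 1 := by omega
    rw [hm, List.range_succ_eq_map]
    simp only [List.map_cons, List.map_map, Nat.cast_zero, mul_zero, add_zero]
    congr 1
    apply List.map_congr_left
    intro k _
    simp only [Function.comp_apply]
    push_cast
    ring
  · rw [if_neg h2]
    have hm : ((b - a + 32 - 1) / 32).toNat = 1 := by omega
    rw [hm]
    simp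

theorem pvChunk_nil : pvChunk [] = [] := by
  rw [pvChunk]
  simp

theorem pvChunk_block (c x : List Int) (hc : c.length = 32) :
    pvChunk (c ++ x) = pvPack 0 c :: pvChunk x := by
  rw [pvChunk]
  have hne : c ++ x ≠ [] := by
    intro h; have := congrArg List.length h; simp [hc] at this
  rw [dif_neg hne]
  have h1 : (c ++ x).take 32 = c := by rw [← hc, List.take_left]
  have h2 : (c ++ x).drop 32 = x := by rw [← hc, List.drop_left]
  rw [h1, h2]

-- A's chunk loop over range(i, len(l), 32) computes pvChunk of the tail
theorem pvAloop (l : List Int) (i : Nat) (arr : List Int) :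
    (PySem.List.pyRange (i : Int) (l.length : Int) 32).foldl (fun uint32_array j =>
      uint32_array ++
        [(PySem.List.slice l (some j) (some (j + 32))).foldl
          (fun val bit => PySem.Int.bor (val <<< (1 : Nat)) bit) 0]) arr
    = arr ++ pvChunk (l.drop i) := by
  by_cases h : i < l.length
  · rw [pvRange32_cons _ _ (by exact_mod_cast h)]
    rw [List.foldl_cons]
    have hcast : (i : Int) + 32 = ((i + 32 : Nat) : Int) := by push_cast; ring
    have hslice : PySem.List.slice l (some (i : Int)) (some ((i : Int) + 32))
        = (l.drop i).take 32 := by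
      rw [hcast, PySem.List.slice_natCast]
      congr 1
      omega
    rw [hslice, hcast, pvAloop l (i + 32)]
    have hd : l.drop i ≠ [] := by
      intro hnil
      have := congrArg List.length hnil
      simp at this
      omega
    conv_rhs => rw [pvChunk]
    rw [dif_neg hd]
    rw [List.drop_drop]
    simp [pvPack]
  · rw [pvRange32_nil _ _ (by exact_mod_cast Nat.le_of_not_lt h)]
    rw [List.drop_eq_nil_of_le (by omega), pvChunk_nil]
    simp
termination_by l.length - i
decreasing_by omega

-- streaming, no flush: fewer than 32 bits accumulated
theorem pvS_no (c : List Int) (v : Int) (k : Nat) (out : List Int) (h : k + c.length < 32) :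
    c.foldl pvStep (v, k, out) = (pvPack v c, k + c.length, out) := by
  induction c generalizing v k with
  | nil => simp [pvPack]
  | cons b t ih =>
    rw [List.foldl_cons]
    have hs : pvStep (v, k, out) b
        = (PySem.Int.bor (v <<< (1 : Nat)) b, k + 1, out) := by
      simp only [pvStep]
      rw [if_neg (by simp at h ⊢; omega)]
    rw [hs, ih _ _ (by simp at h ⊢; omega)]
    simp [pvPack]
    omega

-- streaming, exact flush: the 32nd bit emits the packed word and resets the state
theorem pvS_full (c : List Int) (v : Int) (k : Nat) (out : List Int)
    (hne : c ≠ []) (h : k + c.length = 32) :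
    c.foldl pvStep (v, k, out) = (0, 0, out ++ [pvPack v c]) := by
  induction c generalizing v k out with
  | nil => exact absurd rfl hne
  | cons b t ih =>
    rw [List.foldl_cons]
    by_cases ht : t = []
    · subst ht
      have hk : k + 1 = 32 := by simp at h; omega
      simp only [pvStep]
      rw [if_pos hk]
      simp [pvPack]
    · have hs : pvStep (v, k, out) b
          = (PySem.Int.bor (v <<< (1 : Nat)) b, k + 1, out) := by
        simp only [pvStep]
        rw [if_neg (by
          have : 1 ≤ t.length := List.length_pos_iff.mpr ht
          simp at h; omega)]
      rw [hs, ih _ _ _ ht (by simp at h; omega)]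
      simp [pvPack]

-- packing trailing zero bits is a left shift
theorem pvPack_zeros (k : Nat) (v : Int) :
    pvPack v (List.replicate k (0 : Int)) = v <<< k := by
  induction k generalizing v with
  | zero => simp [pvPack]
  | succ n ih =>
    rw [List.replicate_succ]
    have : pvPack v ((0 : Int) :: List.replicate n 0)
        = pvPack (PySem.Int.bor (v <<< (1 : Nat)) 0) (List.replicate n 0) := rfl
    rw [this, PySem.Int.bor_zero, ih]
    simp [Int.shiftLeft_eq, pow_succ]
    ring

-- the streaming pass equals pvChunk of the padded list
theorem pvM (l : List Int) (out : List Int) :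
    pvFin (l.foldl pvStep (0, 0, out)) = out ++ pvChunk (pvPad l) := by
  by_cases h32 : 32 ≤ l.length
  · have hsplit : l.take 32 ++ l.drop 32 = l := List.take_append_drop 32 l
    have hc : (l.take 32).length = 32 := by simp; omega
    have hne : l.take 32 ≠ [] := by
      intro hnil; rw [hnil] at hc; simp at hc
    conv_lhs => rw [← hsplit]
    rw [List.foldl_append, pvS_full _ _ _ _ hne (by rw [hc])]
    rw [pvM (l.drop 32) (out ++ [pvPack 0 (l.take 32)])]
    have hpad : pvPad l = l.take 32 ++ pvPad (l.drop 32) := by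
      have hlen : l.length % 32 = (l.length - 32) % 32 := by omega
      simp only [pvPad, List.length_drop, hlen]
      split_ifs
      · rw [← List.append_assoc, hsplit]
      · exact hsplit.symm
    rw [hpad, pvChunk_block _ _ hc]
    simp
  · by_cases hnil : l = []
    · subst hnil
      simp [pvFin, pvPad, pvChunk_nil]
    · have hlen : 0 < l.length := List.length_pos_iff.mpr hnil
      rw [pvS_no _ _ _ _ (by omega)]
      have hmod : l.length % 32 = l.length := Nat.mod_eq_of_lt (by omega)
      have hpad : pvPad l = l ++ List.replicate (32 - l.length) (0 : Int) := by
        simp only [pvPad, hmod]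
        rw [if_pos (by omega)]
      have hplen : (pvPad l).length = 32 := by
        rw [hpad]; simp; omega
      have hchunk : pvChunk (pvPad l) = [pvPack 0 (pvPad l)] := by
        conv_lhs => rw [← List.append_nil (pvPad l)]
        rw [pvChunk_block _ _ hplen, pvChunk_nil]
      rw [hchunk, hpad]
      have : pvPack 0 (l ++ List.replicate (32 - l.length) (0 : Int))
          = pvPack 0 l <<< (32 - l.length) := by
        simp only [pvPack, List.foldl_append]
        exact pvPack_zeros _ _
      simp only [pvFin]
      rw [if_pos (by simpa using hlen)]
      rw [this]
      simp
termination_by l.length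
decreasing_by simp only [List.length_drop]; omega

theorem pvA_eq (bm : List (List Int)) (r : Int) :
    bitmap_to_uint32 bm r = pvChunk (pvPad bm.flatten) := by
  unfold bitmap_to_uint32
  rw [pvFoldlAppend, List.nil_append]
  have h := pvAloop (pvPad bm.flatten) 0 []
  simp only [Nat.cast_zero, List.drop_zero, List.nil_append] at h
  exact h

theorem pvB_eq (bm : List (List Int)) (r : Int) :
    bitmap_to_uint32_alt bm r = pvFin (bm.foldl (fun s row => row.foldl pvStep s) (0, 0, [])) := rfl

-- ===== VERDICT (by name: the statement is the Claim_ definition above) =====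
theorem bitmap_to_uint32_spec : Claim_equal_bitmap_to_uint32 := by
  intro bm r _
  show bitmap_to_uint32 bm r = bitmap_to_uint32_alt bm r
  rw [pvA_eq, pvB_eq, pvFoldlFlatten, pvM, List.nil_append]
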